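-- pv_equiv track=rewrite | github.com/perfsonar/microdep | microdep/perfsonar-microdep/bin/microdep_commands/trace_event_reader.py | count
-- ===== SOURCE A (Python) =====
-- def count(obs):
--
--     tmp = obs[0]
--     count = 0
-- #    counter = []
--     counter = {}
--
--     for x in range(len(obs)):
--         if tmp == obs[x]:
--             count += 1
--         else:
--             #counter.append(str(tmp) + ": " + str(count))
--             counter[str(tmp)] = count
--             tmp = obs[x]
--             count = 1
--
--     #counter.append(str(tmp) + ": " + str(count))
--     counter[str(tmp)] = count
--
--     return counter
-- ===== SOURCE B (Python) =====
-- def count(obs):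
--     n = len(obs)
--     starts = [i for i in range(n) if i == 0 or obs[i] != obs[i - 1]]
--     return {str(obs[s]): e - s for s, e in zip(starts, starts[1:] + [n])}
-- ===== Notes on version B (the rewrite author's own statement) =====
-- stated objective: alternative
-- what changed: B replaces A's stateful tmp/count run-tracking loop by two staged passes: a comprehension collects the run-start boundary indices (i==0 or obs[i]!=obs[i-1]), then a dict comprehension over zip(starts, starts[1:]+[n]) writes each run length as an index difference; no counter state is maintained.
import Mathlib
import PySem

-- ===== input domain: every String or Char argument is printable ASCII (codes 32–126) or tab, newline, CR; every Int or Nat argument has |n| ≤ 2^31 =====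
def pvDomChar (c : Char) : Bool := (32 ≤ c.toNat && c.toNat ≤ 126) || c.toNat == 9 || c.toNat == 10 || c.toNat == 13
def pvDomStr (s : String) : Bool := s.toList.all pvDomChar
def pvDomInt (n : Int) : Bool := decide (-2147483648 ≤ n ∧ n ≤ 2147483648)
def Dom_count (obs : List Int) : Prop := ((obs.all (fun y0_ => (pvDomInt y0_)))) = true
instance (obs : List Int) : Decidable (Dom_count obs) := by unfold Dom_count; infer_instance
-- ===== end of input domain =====

-- B replaces A's tmp/count run-tracking state machine by boundary indices + zip of index gaps (same cost); return-value equivalence on non-empty input.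

-- ===== PORT A =====
-- the loop body of 'for x in range(len(obs))' (obs[x] is always in range, so pyGetD is exact here)
def countStep (obs : List Int) (s : Int × Int × PySem.Dict String Int) (x : Int) :
    Int × Int × PySem.Dict String Int :=
  if s.1 == PySem.List.pyGetD obs x 0 then (s.1, s.2.1 + 1, s.2.2)
  else (PySem.List.pyGetD obs x 0, 1, PySem.Dict.insert s.2.2 (PySem.Int.toStr s.1) s.2.1)

def count (obs : List Int) : List (String × Int) :=
  match obs with
  | [] => []  -- reading the first element raises IndexError here; excluded by Pre_count
  | t0 :: _ =>
    let s := (PySem.List.pyRange 0 (PySem.List.len obs) 1).foldl (countStep obs) (t0, 0, PySem.Dict.empty)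
    (PySem.Dict.insert s.2.2 (PySem.Int.toStr s.1) s.2.1).items

-- ===== PORT B =====
-- starts = [i for i in range(n) if i == 0 or obs[i] != obs[i-1]]  (a comprehension is a filter;
-- every index read is in range, so pyGetD is exact; for i = 0 the 'or' short-circuits)
def startsB (obs : List Int) : List Int :=
  (PySem.List.pyRange 0 (PySem.List.len obs) 1).filter
    (fun i => i == 0 || !(PySem.List.pyGetD obs i 0 == PySem.List.pyGetD obs (i - 1) 0))

def count_alt (obs : List Int) : List (String × Int) :=
  (((startsB obs).zip ((startsB obs).drop 1 ++ [PySem.List.len obs])).foldl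
    (fun d p => PySem.Dict.insert d (PySem.Int.toStr (PySem.List.pyGetD obs p.1 0)) (p.2 - p.1))
    PySem.Dict.empty).items

-- ===== PRECONDITION & SPEC =====
-- Pre_ excludes only the empty list, on which A raises IndexError reading the first element.
def Pre_count (obs : List Int) : Prop := obs ≠ []
instance (obs : List Int) : Decidable (Pre_count obs) := by unfold Pre_count; infer_instance
def pvWitness_count : List Int := [1, 1, 2]

def Spec_count (obs : List Int) (out : List (String × Int)) : Prop := out = count_alt obs
instance (obs : List Int) (out : List (String × Int)) : Decidable (Spec_count obs out) := by unfold Spec_count; infer_instance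

-- ===== CLAIM (what is proved, stated in full; the proofs are below) =====
def Claim_equal_count : Prop := ∀ (obs : List Int), Dom_count obs → Pre_count obs → Spec_count obs (count obs)

-- ===== LEMMAS AND PROOFS =====

-- A's loop body, with the element already fetched
def loopStep (s : Int × Int × PySem.Dict String Int) (v : Int) : Int × Int × PySem.Dict String Int :=
  if s.1 == v then (s.1, s.2.1 + 1, s.2.2)
  else (v, 1, PySem.Dict.insert s.2.2 (PySem.Int.toStr s.1) s.2.1)

-- the runs of xs when a run of value tmp with current length c is already open (A's residual computation)
def augGroups (tmp c : Int) : List Int → List (Int × Int)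
  | [] => [(tmp, c)]
  | x :: xs => if x == tmp then augGroups tmp (c + 1) xs else (tmp, c) :: augGroups x 1 xs

def flush (s : Int × Int × PySem.Dict String Int) : PySem.Dict String Int :=
  PySem.Dict.insert s.2.2 (PySem.Int.toStr s.1) s.2.1

def insRun (d : PySem.Dict String Int) (p : Int × Int) : PySem.Dict String Int :=
  PySem.Dict.insert d (PySem.Int.toStr p.1) p.2

-- A's loop plus the trailing flush folds exactly the residual runs into the dict
theorem loopStep_char (xs : List Int) : ∀ (tmp c : Int) (d : PySem.Dict String Int),
    flush (xs.foldl loopStep (tmp, c, d)) = (augGroups tmp c xs).foldl insRun d := by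
  induction xs with
  | nil => intro tmp c d; rfl
  | cons x xs ih =>
    intro tmp c d
    by_cases h : x = tmp
    · subst h
      simp only [List.foldl_cons, loopStep, beq_self_eq_true, if_true, augGroups]
      exact ih x (c + 1) d
    · have hx : (x == tmp) = false := by simp [h]
      have ht : (tmp == x) = false := by simp [Ne.symm h]
      simp only [List.foldl_cons, loopStep, ht, Bool.false_eq_true, if_false, augGroups, hx]
      exact ih x 1 (PySem.Dict.insert d (PySem.Int.toStr tmp) c)

-- ---- B side: run starts with their values, structurally ----

-- run starts of l strictly after an element prev, paired with the run's value
def stAuxV (prev : Int) : List Int → List (Nat × Int)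
  | [] => []
  | x :: t => (if x == prev then [] else [(0, x)]) ++ (stAuxV x t).map (fun p => (p.1 + 1, p.2))

theorem stAuxV_getD : ∀ (l : List Int) (prev : Int) (p : Nat × Int),
    p ∈ stAuxV prev l → l.getD p.1 0 = p.2 := by
  intro l
  induction l with
  | nil => intro prev p h; simp [stAuxV] at h
  | cons x t ih =>
    intro prev p h
    simp only [stAuxV, List.mem_append, List.mem_map] at h
    rcases h with h | ⟨q, hm, he⟩
    · by_cases hx : x == prev
      · simp [hx] at h
      · simp [hx] at h
        subst h; rfl
    · subst he
      simpa using ih x q hm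

-- the Nat start indices of l after prev: filter formulation equals stAuxV's firsts
theorem stList_eq (l : List Int) : ∀ (prev : Int),
    (List.range l.length).filter (fun j => !(l.getD j 0 == (prev :: l).getD j 0))
      = (stAuxV prev l).map Prod.fst := by
  induction l with
  | nil => intro prev; simp [stAuxV]
  | cons x t ih =>
    intro prev
    rw [List.length_cons, List.range_succ_eq_map, List.filter_cons, List.filter_map]
    have h2 : (fun j => !((x :: t).getD j 0 == (prev :: x :: t).getD j 0)) ∘ Nat.succ
        = fun j => !(t.getD j 0 == (x :: t).getD j 0) := by
      funext j; rfl
    rw [h2, ih x, stAuxV, List.map_append, List.map_map]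
    by_cases hx : x == prev
    · simp only [List.getD_cons_zero, hx, Bool.not_true, Bool.false_eq_true, if_false]
      simp [Function.comp]
    · simp only [List.getD_cons_zero, hx, Bool.not_false, if_true]
      simp [Function.comp]

-- (value, run length) pairs from start-with-value entries and the total length
def mkPairsV : List (Nat × Int) → Nat → List (Int × Int)
  | [], _ => []
  | [(s, v)], n => [(v, (n : Int) - (s : Int))]
  | (s, v) :: (s', v') :: t, n => (v, (s' : Int) - (s : Int)) :: mkPairsV ((s', v') :: t) n

-- the pure combinatorial core: boundary gaps are exactly the runs A tracks
theorem mkPairsV_eq_augGroups (rest : List Int) : ∀ (tmp : Int) (s o : Nat), s ≤ o →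
    mkPairsV ((s, tmp) :: (stAuxV tmp rest).map (fun p => (p.1 + o, p.2))) (o + rest.length)
      = augGroups tmp ((o : Int) - (s : Int)) rest := by
  induction rest with
  | nil => intro tmp s o _; simp [stAuxV, mkPairsV, augGroups]
  | cons x t ih =>
    intro tmp s o hso
    by_cases hx : x = tmp
    · subst hx
      simp only [stAuxV, beq_self_eq_true, if_true, List.nil_append, List.map_map]
      have hmap : ((fun p : Nat × Int => (p.1 + o, p.2)) ∘ fun p : Nat × Int => (p.1 + 1, p.2))
          = fun p : Nat × Int => (p.1 + (o + 1), p.2) := by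
        funext p; simp [Function.comp]; omega
      rw [hmap]
      have hlen : o + (x :: t).length = (o + 1) + t.length := by simp [List.length_cons]; omega
      rw [hlen, ih x s (o + 1) (by omega)]
      have : augGroups x ((o : Int) - (s : Int)) (x :: t)
          = augGroups x (((o : Int) - (s : Int)) + 1) t := by
        simp [augGroups]
      rw [this]
      congr 1
      push_cast; ring
    · have hxb : (x == tmp) = false := by simp [hx]
      simp only [stAuxV, hxb, Bool.false_eq_true, if_false, List.map_append, List.map_map,
        List.map_cons, List.map_nil, Nat.zero_add]
      have hmap : ((fun p : Nat × Int => (p.1 + o, p.2)) ∘ fun p : Nat × Int => (p.1 + 1, p.2))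
          = fun p : Nat × Int => (p.1 + (o + 1), p.2) := by
        funext p; simp [Function.comp]; omega
      rw [hmap]
      simp only [List.singleton_append]
      have hunf : mkPairsV ((s, tmp) :: (o, x) :: (stAuxV x t).map (fun p => (p.1 + (o + 1), p.2))) (o + (x :: t).length)
          = (tmp, ((o : Nat) : Int) - ((s : Nat) : Int)) ::
              mkPairsV ((o, x) :: (stAuxV x t).map (fun p => (p.1 + (o + 1), p.2))) (o + (x :: t).length) := rfl
      rw [hunf]
      have hlen : o + (x :: t).length = (o + 1) + t.length := by simp [List.length_cons]; omega
      rw [hlen, ih x o (o + 1) (by omega)]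
      have hone : (((o + 1 : Nat)) : Int) - ((o : Nat) : Int) = 1 := by push_cast; ring
      rw [hone]
      simp [augGroups, hxb]

-- folding B's zip pairs equals folding mkPairsV, given the start values match the list
theorem zip_fold_eq_mkPairsV (obs : List Int) :
    ∀ (sv : List (Nat × Int)) (n : Nat) (d : PySem.Dict String Int),
    (∀ p ∈ sv, obs.getD p.1 0 = p.2) →
    (((sv.map (fun p => (p.1 : Int))).zip ((sv.map (fun p => (p.1 : Int))).drop 1 ++ [(n : Int)])).foldl
        (fun d p => PySem.Dict.insert d (PySem.Int.toStr (PySem.List.pyGetD obs p.1 0)) (p.2 - p.1)) d)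
      = (mkPairsV sv n).foldl insRun d := by
  intro sv
  induction sv with
  | nil => intro n d _; rfl
  | cons a sv ih =>
    intro n d hval
    match sv, ih with
    | [], _ =>
      simp only [List.map_cons, List.map_nil, List.drop_succ_cons, List.drop_nil,
        List.nil_append, List.zip_cons_cons, List.zip_nil_right, List.foldl_cons, List.foldl_nil,
        mkPairsV, insRun]
      rw [PySem.List.pyGetD_natCast]
      rw [hval a (by simp)]
    | b :: sv', ih =>
      simp only [List.map_cons, List.drop_succ_cons, List.drop_zero, List.cons_append,
        List.zip_cons_cons, List.foldl_cons]
      rw [PySem.List.pyGetD_natCast, hval a (by simp)]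
      have hm : mkPairsV (a :: b :: sv') n = (a.2, (b.1 : Int) - (a.1 : Int)) :: mkPairsV (b :: sv') n := by
        rcases a with ⟨s, v⟩; rcases b with ⟨s', v'⟩; rfl
      rw [hm, List.foldl_cons]
      simp only [insRun]
      have hrec := ih n (PySem.Dict.insert d (PySem.Int.toStr a.2) ((b.1 : Int) - (a.1 : Int)))
        (fun p hp => hval p (List.mem_cons_of_mem a hp))
      simp only [List.map_cons, List.drop_succ_cons, List.drop_zero] at hrec
      exact hrec

-- B's Int start list is the cast of the structural start list
theorem starts_eq (t0 : Int) (rest : List Int) :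
    startsB (t0 :: rest)
    = (((0, t0) :: (stAuxV t0 rest).map (fun p => (p.1 + 1, p.2))).map (fun p => ((p.1 : Nat) : Int))) := by
  have hlen : PySem.List.len (t0 :: rest) = ((t0 :: rest).length : Int) := by
    simp [pysem]
  rw [startsB, hlen, PySem.List.pyRange_zero_natCast, List.filter_map]
  have hpred : ((fun i : Int => i == 0 || !(PySem.List.pyGetD (t0 :: rest) i 0 == PySem.List.pyGetD (t0 :: rest) (i - 1) 0))
      ∘ (fun k : Nat => (k : Int)))
      = fun j : Nat => decide (j = 0) || !((t0 :: rest).getD j 0 == ((t0 :: t0 :: rest).getD j 0)) := by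
    funext j
    cases j with
    | zero => simp
    | succ j =>
      simp only [Function.comp]
      have h0 : (((j + 1 : Nat) : Int) == 0) = false := by
        rw [beq_eq_false_iff_ne]; push_cast; omega
      have hj : ((j + 1 : Nat) : Int) - 1 = (j : Nat) := by push_cast; ring
      rw [h0, hj, PySem.List.pyGetD_natCast, PySem.List.pyGetD_natCast]
      simp
  rw [hpred]
  have hsplit : (List.range (t0 :: rest).length).filter
      (fun j : Nat => decide (j = 0) || !((t0 :: rest).getD j 0 == ((t0 :: t0 :: rest).getD j 0)))
      = 0 :: ((List.range rest.length).filter (fun j => !(rest.getD j 0 == (t0 :: rest).getD j 0))).map Nat.succ := by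
    rw [List.length_cons, List.range_succ_eq_map, List.filter_cons, List.filter_map]
    have hc : ((fun j : Nat => decide (j = 0) || !((t0 :: rest).getD j 0 == ((t0 :: t0 :: rest).getD j 0))) ∘ Nat.succ)
        = fun j : Nat => !(rest.getD j 0 == (t0 :: rest).getD j 0) := by
      funext j; simp
    rw [hc]
    simp
  rw [hsplit, stList_eq rest t0]
  simp [Function.comp, Nat.succ_eq_add_one]

-- ===== VERDICT (by name: the statement is the Claim_ definition above) =====
theorem count_spec : Claim_equal_count := by
  intro obs _ hpre
  unfold Spec_count
  match obs, hpre with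
  | t0 :: rest, _ =>
    -- A's side: loop + flush = fold over augGroups
    have hbridge : (PySem.List.pyRange 0 (PySem.List.len (t0 :: rest)) 1).foldl
        (countStep (t0 :: rest)) (t0, 0, PySem.Dict.empty)
        = (t0 :: rest).foldl loopStep (t0, 0, PySem.Dict.empty) :=
      PySem.List.foldl_pyRange_zero_pyGetD' (t0 :: rest) 0 loopStep (t0, 0, PySem.Dict.empty)
    have hA : count (t0 :: rest) = ((augGroups t0 1 rest).foldl insRun PySem.Dict.empty).items := by
      show (flush ((PySem.List.pyRange 0 (PySem.List.len (t0 :: rest)) 1).foldl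
          (countStep (t0 :: rest)) (t0, 0, PySem.Dict.empty))).items = _
      rw [hbridge]
      have hfirst : (t0 :: rest).foldl loopStep (t0, 0, PySem.Dict.empty)
          = rest.foldl loopStep (t0, 1, PySem.Dict.empty) := by
        simp [loopStep]
      rw [hfirst, loopStep_char]
    -- B's side
    have hB : count_alt (t0 :: rest) = ((augGroups t0 1 rest).foldl insRun PySem.Dict.empty).items := by
      unfold count_alt
      rw [starts_eq t0 rest]
      
      have hlen : PySem.List.len (t0 :: rest) = (((t0 :: rest).length : Nat) : Int) := by simp [pysem]
      rw [hlen]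
      have hvals : ∀ p ∈ (0, t0) :: (stAuxV t0 rest).map (fun p : Nat × Int => (p.1 + 1, p.2)),
          (t0 :: rest).getD p.1 0 = p.2 := by
        intro p hp
        rcases List.mem_cons.mp hp with h | h
        · subst h; rfl
        · rcases List.mem_map.mp h with ⟨⟨j, w⟩, hm, he⟩
          subst he
          simpa using stAuxV_getD rest t0 (j, w) hm
      rw [zip_fold_eq_mkPairsV (t0 :: rest) _ (t0 :: rest).length PySem.Dict.empty hvals]
      have := mkPairsV_eq_augGroups rest t0 0 1 (by omega)
      simp only [Nat.cast_one, Nat.cast_zero, sub_zero] at this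
      have hl : (t0 :: rest).length = 1 + rest.length := by simp [List.length_cons]; omega
      rw [hl, this]
    rw [hA, hB]
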